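-- pv_equiv track=rewrite | github.com/Zaam02/CamilaZamora-GBI6 | restenz.py | enzima
-- ===== SOURCE A (Python) =====
-- def enzima(secuencia, empalme):
--     fragmentos = []
--     sitiocorte = secuencia.find(empalme)
--
--     while sitiocorte >= 0:
--         frag1 = secuencia[:sitiocorte + len(empalme)]
--         frag2 = secuencia[sitiocorte + len(empalme):]
--         fragmentos.append([frag1, len(frag1)])
--         fragmentos.append([frag2, len(frag2)])
--
--         secuencia = frag2
--         sitiocorte = secuencia.find(empalme)
--
--     return fragmentos
-- ===== SOURCE B (Python) =====
-- def enzima(secuencia, empalme):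
--     # first pass: collect absolute end positions of each non-overlapping match
--     ends = []
--     start = 0
--     while True:
--         sitio = secuencia.find(empalme, start)
--         if sitio < 0:
--             break
--         start = sitio + len(empalme)
--         ends.append(start)
--     # second pass: emit fragments by absolute indices into the unmodified string
--     out = []
--     prev = 0
--     for e in ends:
--         out.append([secuencia[prev:e], e - prev])
--         out.append([secuencia[e:], len(secuencia) - e])
--         prev = e
--     return out
-- ===== Notes on version B (the rewrite author's own statement) =====
-- stated objective: alternative
-- what changed: B separates cut discovery from fragment emission: one pass collects absolute non-overlapping match-end positions with find(empalme, start) on the unmodified string, a second pass slices the original by absolute indices and computes fragment lengths arithmetically, instead of A's loop that repeatedly reassigns a shrinking secuencia and re-finds from position 0.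
import Mathlib
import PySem

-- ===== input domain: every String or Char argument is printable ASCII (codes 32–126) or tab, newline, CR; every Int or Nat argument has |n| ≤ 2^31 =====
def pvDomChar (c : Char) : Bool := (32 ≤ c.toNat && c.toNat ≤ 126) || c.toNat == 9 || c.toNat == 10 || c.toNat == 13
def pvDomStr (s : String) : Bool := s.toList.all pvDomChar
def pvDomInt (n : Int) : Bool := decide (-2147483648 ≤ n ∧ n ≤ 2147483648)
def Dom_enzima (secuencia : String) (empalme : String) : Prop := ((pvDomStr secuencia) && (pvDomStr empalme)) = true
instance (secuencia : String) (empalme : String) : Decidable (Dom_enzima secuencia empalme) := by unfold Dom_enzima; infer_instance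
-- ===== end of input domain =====

-- B separates cut-position discovery (absolute indices via find-with-start) from fragment
-- emission over the unmodified string, instead of A's shrinking-string loop; same cost (objective: alternative).

-- ===== PORT A =====
-- A's while loop: re-find empalme in the current (shrinking) secuencia, emit the two
-- fragments, continue on the tail fragment.  Fuel = |secuencia|+1 only makes the loop
-- total in Lean: with empalme ≠ "" (Pre_) each step strictly shrinks the string, so the
-- fuel is never exhausted; with empalme = "" Python A loops forever (excluded by Pre_).
def enzimaLoop (secuencia : List Char) (empalme : List Char) (fuel : Nat) : List (String × Int) :=
  match fuel with
  | 0 => []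
  | fuel + 1 =>
    let sitiocorte := PySem.Chars.find secuencia empalme
    if 0 ≤ sitiocorte then
      let frag1 := PySem.List.slice secuencia none (some (sitiocorte + empalme.length))
      let frag2 := PySem.List.slice secuencia (some (sitiocorte + empalme.length)) none
      (String.ofList frag1, (frag1.length : Int)) ::
      (String.ofList frag2, (frag2.length : Int)) ::
      enzimaLoop frag2 empalme fuel
    else []

def enzima (secuencia : String) (empalme : String) : List (String × Int) :=
  enzimaLoop secuencia.toList empalme.toList (secuencia.toList.length + 1)

-- ===== PORT B =====
-- first pass of B: absolute end positions of the non-overlapping matches (fuel totalizes only).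
def cutEnds (s : List Char) (emp : List Char) (start : Int) (fuel : Nat) : List Int :=
  match fuel with
  | 0 => []
  | fuel + 1 =>
    let sitio := PySem.Chars.findFrom s emp start none
    if sitio < 0 then []
    else
      let e := sitio + emp.length
      e :: cutEnds s emp e fuel

-- second pass of B: emit fragments by absolute indices, lengths computed arithmetically.
def emitFrags (s : List Char) (ends : List Int) (prev : Int) : List (String × Int) :=
  match ends with
  | [] => []
  | e :: rest =>
    (String.ofList (PySem.List.slice s (some prev) (some e)), e - prev) ::
    (String.ofList (PySem.List.slice s (some e) none), (s.length : Int) - e) ::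
    emitFrags s rest e

def enzima_alt (secuencia : String) (empalme : String) : List (String × Int) :=
  let s := secuencia.toList
  emitFrags s (cutEnds s empalme.toList 0 (s.length + 1)) 0

-- ===== PRECONDITION & SPEC =====
-- Pre_ excludes empalme = "", on which Python A (and B) never returns: find('') is always 0, so the loop is infinite.
def Pre_enzima (secuencia : String) (empalme : String) : Prop := empalme ≠ ""
instance (secuencia : String) (empalme : String) : Decidable (Pre_enzima secuencia empalme) := by unfold Pre_enzima; infer_instance

def pvWitness_enzima : String × String := ("gaattcaagaattc", "gaattc")

def Spec_enzima (secuencia : String) (empalme : String) (out : List (String × Int)) : Prop := out = enzima_alt secuencia empalme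
instance (secuencia : String) (empalme : String) (out : List (String × Int)) : Decidable (Spec_enzima secuencia empalme out) := by unfold Spec_enzima; infer_instance

-- ===== CLAIM (what is proved, stated in full; the proofs are below) =====
def Claim_equal_enzima : Prop := ∀ (secuencia : String) (empalme : String), Dom_enzima secuencia empalme → Pre_enzima secuencia empalme → Spec_enzima secuencia empalme (enzima secuencia empalme)

-- ===== LEMMAS AND PROOFS =====

-- Main invariant: running A's loop on the suffix o.drop k equals B's emission of the cut
-- ends found from absolute offset k in the original o.
theorem loop_eq_emit (emp : List Char) (hemp : emp ≠ []) :
    ∀ (fuel : Nat) (o : List Char) (k : Nat), k ≤ o.length →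
      enzimaLoop (o.drop k) emp fuel = emitFrags o (cutEnds o emp (k : Int) fuel) (k : Int) := by
  intro fuel
  induction fuel with
  | zero => intro o k hk; simp [enzimaLoop, cutEnds, emitFrags]
  | succ fuel ih =>
    intro o k hk
    rw [enzimaLoop, cutEnds]
    rw [PySem.Chars.findFrom_natCast o emp k hk]
    by_cases hneg : PySem.Chars.find (o.drop k) emp = -1
    · rw [if_pos hneg]
      have h2 : ¬ (0 ≤ PySem.Chars.find (o.drop k) emp) := by rw [hneg]; omega
      simp only [h2, if_false, if_pos (by omega : (-1 : Int) < 0), emitFrags]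
    · have hge : 0 ≤ PySem.Chars.find (o.drop k) emp := by
        have := PySem.Chars.neg_one_le_find (o.drop k) emp
        omega
      set f := PySem.Chars.find (o.drop k) emp with hfdef
      set m := emp.length with hmdef
      have hm1 : 1 ≤ m := by
        cases emp with
        | nil => exact absurd rfl hemp
        | cons a t => simp [hmdef]
      have hfN : (f.toNat : Int) = f := Int.toNat_of_nonneg hge
      have hpre : emp <+: (o.drop k).drop f.toNat := (PySem.Chars.find_spec hge).1
      have hlen : f.toNat + m + k ≤ o.length := by
        have := hpre.length_le
        simp [List.length_drop] at this
        omega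
      rw [if_neg hneg, if_neg (by omega : ¬ ((k : Int) + f < 0))]
      rw [emitFrags]
      -- pieces
      have e1 : PySem.List.slice (o.drop k) none (some (f + (m:Int))) = (o.drop k).take (f.toNat + m) := by
        rw [PySem.List.slice_to (o.drop k) (by omega)]
        congr 1
        omega
      have e2 : PySem.List.slice o (some (k:Int)) (some ((k:Int) + f + m)) = (o.drop k).take (f.toNat + m) := by
        rw [PySem.List.slice_toNat o (by omega) (by omega)]
        congr 1; omega
      have e3 : PySem.List.slice (o.drop k) (some (f + (m:Int))) none = o.drop (k + (f.toNat + m)) := by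
        rw [PySem.List.slice_from (o.drop k) (by omega), List.drop_drop]
        congr 1
        omega
      have e4 : PySem.List.slice o (some ((k:Int) + f + m)) none = o.drop (k + (f.toNat + m)) := by
        rw [PySem.List.slice_from o (by omega)]
        congr 1
        omega
      have l1 : (((o.drop k).take (f.toNat + m)).length : Int) = (k:Int) + f + m - k := by
        simp [List.length_take, List.length_drop]
        omega
      have l2 : ((o.drop (k + (f.toNat + m))).length : Int) = (o.length : Int) - ((k:Int) + f + m) := by
        simp [List.length_drop]
        omega
      have ihh := ih o (k + (f.toNat + m)) (by omega)
      have hcast : ((k + (f.toNat + m) : Nat) : Int) = (k:Int) + f + m := by push_cast; omega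
      simp only [e1, e2, e3, e4, l1, l2]
      rw [← hcast, ← ihh, if_pos hge]

-- ===== VERDICT (by name: the statement is the Claim_ definition above) =====
theorem enzima_spec : Claim_equal_enzima := by
  intro s emp _ hpre
  unfold Spec_enzima enzima enzima_alt
  have hemp : emp.toList ≠ [] := by
    intro h
    exact hpre (String.toList_eq_nil_iff.mp h)
  have h := loop_eq_emit emp.toList hemp (s.toList.length + 1) s.toList 0 (Nat.zero_le _)
  simp only [List.drop_zero, Nat.cast_zero] at h
  exact h
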